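-- pv_equiv track=rewrite | github.com/festivecasual/sigma2-mud | command.py | get_parsed_prepositional_phrases
-- ===== SOURCE A (Python) =====
-- from enum import Enum
--
-- class Prepositions(Enum):
--     TO = "to"
--     FROM = "from"
--     AT = "at"
--     IN = "in"
--     ON = "on"
--
-- def get_parsed_prepositional_phrases(split_message):
--     phrases = []
--     preposition_indexes = []
--     for idx in range(len(split_message)):
--         if split_message[idx] in (prep.value for prep in Prepositions):
--             preposition_indexes.append(idx)
--     while preposition_indexes:
--         idx = preposition_indexes.pop(0)
--         if preposition_indexes:
--             idx2 = preposition_indexes[0]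
--         else:
--             idx2 = len(split_message)
--         phrases.append(split_message[idx:idx2])
--     return phrases
-- ===== SOURCE B (Python) =====
-- _PREPS = frozenset({"to", "from", "at", "in", "on"})
--
-- def get_parsed_prepositional_phrases(split_message):
--     # single pass: start a new phrase at each preposition, flush the previous one
--     phrases = []
--     cur = None
--     for word in split_message:
--         if word in _PREPS:
--             if cur is not None:
--                 phrases.append(cur)
--             cur = [word]
--         elif cur is not None:
--             cur.append(word)
--     if cur is not None:
--         phrases.append(cur)
--     return phrases
-- ===== Notes on version B (the rewrite author's own statement) =====
-- stated objective: faster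
-- what changed: Replaced A's two-phase index-collection plus slicing (gather all preposition indexes, then pop(0) and cut a slice between consecutive indexes) by a single pass that starts a new phrase at each preposition and appends non-preposition words to the current phrase.
import Mathlib
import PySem

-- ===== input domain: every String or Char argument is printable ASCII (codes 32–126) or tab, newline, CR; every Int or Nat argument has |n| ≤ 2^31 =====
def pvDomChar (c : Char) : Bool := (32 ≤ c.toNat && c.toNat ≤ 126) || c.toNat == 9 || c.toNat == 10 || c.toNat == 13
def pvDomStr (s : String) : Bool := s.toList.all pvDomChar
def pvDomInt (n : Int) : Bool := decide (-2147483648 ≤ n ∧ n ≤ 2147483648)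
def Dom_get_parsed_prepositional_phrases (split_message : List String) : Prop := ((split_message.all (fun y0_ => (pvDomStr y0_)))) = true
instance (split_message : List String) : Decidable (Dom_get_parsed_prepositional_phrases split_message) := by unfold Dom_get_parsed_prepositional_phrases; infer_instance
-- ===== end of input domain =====

-- B replaces A's two-phase index-collection + slicing by one pass that starts a new
-- phrase at each preposition (objective: faster, one O(n) pass; measured faster in a timing run).

-- ===== PORT A =====
-- the values of the Prepositions enum, in declaration order
def pvPreps : List String := ["to", "from", "at", "in", "on"]

-- the while loop: pop(0) the first index, slice up to the next index (or len)
def pvSlicesA (sm : List String) : List Int → List (List String)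
  | [] => []
  | i :: rest =>
      let i2 : Int := match rest with
        | [] => (sm.length : Int)
        | j :: _ => j
      PySem.List.slice sm (some i) (some i2) :: pvSlicesA sm rest

def get_parsed_prepositional_phrases (split_message : List String) : List (List String) :=
  let preposition_indexes :=
    (PySem.List.pyRange 0 split_message.length 1).foldl
      (fun acc idx =>
        if PySem.List.pyGetD split_message idx "" ∈ pvPreps then acc ++ [idx] else acc) []
  pvSlicesA split_message preposition_indexes

-- ===== PORT B =====
def pvStepB (st : List (List String) × Option (List String)) (w : String) :
    List (List String) × Option (List String) :=
  if w ∈ pvPreps then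
    match st.2 with
    | some c => (st.1 ++ [c], some [w])
    | none => (st.1, some [w])
  else
    match st.2 with
    | some c => (st.1, some (c ++ [w]))
    | none => (st.1, none)

def get_parsed_prepositional_phrases_alt (split_message : List String) : List (List String) :=
  let st := split_message.foldl pvStepB ([], none)
  match st.2 with
  | some c => st.1 ++ [c]
  | none => st.1

-- ===== PRECONDITION & SPEC =====
def Spec_get_parsed_prepositional_phrases (split_message : List String) (out : List (List String)) : Prop := out = get_parsed_prepositional_phrases_alt split_message
instance (split_message : List String) (out : List (List String)) : Decidable (Spec_get_parsed_prepositional_phrases split_message out) := by unfold Spec_get_parsed_prepositional_phrases; infer_instance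

-- ===== CLAIM (what is proved, stated in full; the proofs are below) =====
def Claim_equal_get_parsed_prepositional_phrases : Prop := ∀ (split_message : List String), Dom_get_parsed_prepositional_phrases split_message → Spec_get_parsed_prepositional_phrases split_message (get_parsed_prepositional_phrases split_message)

-- ===== LEMMAS AND PROOFS =====

-- the common specification: a recursive characterisation of the phrase list
def pvIsP (w : String) : Bool := pvPreps.contains w

def pvS : List String → List (List String)
  | [] => []
  | w :: ws => if pvIsP w then (w :: ws.takeWhile (fun x => !pvIsP x)) :: pvS ws else pvS ws

-- ---- B = pvS ----
lemma pvB_some (ws : List String) : ∀ (ph : List (List String)) (c : List String),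
    (match (ws.foldl pvStepB (ph, some c)).2 with
      | some d => (ws.foldl pvStepB (ph, some c)).1 ++ [d]
      | none => (ws.foldl pvStepB (ph, some c)).1)
    = ph ++ (c ++ ws.takeWhile (fun x => !pvIsP x)) :: pvS ws := by
  induction ws with
  | nil => intro ph c; simp [pvS]
  | cons w ws ih =>
      intro ph c
      by_cases h : w ∈ pvPreps
      · have hb : pvIsP w = true := by simpa [pvIsP] using h
        simp only [List.foldl_cons, pvStepB, if_pos h, ih, pvS, hb, List.takeWhile]
        simp
      · have hb : pvIsP w = false := by simpa [pvIsP] using h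
        simp only [List.foldl_cons, pvStepB, if_neg h, ih, pvS, hb, List.takeWhile]
        simp

lemma pvB_none (ws : List String) : ∀ (ph : List (List String)),
    (match (ws.foldl pvStepB (ph, none)).2 with
      | some d => (ws.foldl pvStepB (ph, none)).1 ++ [d]
      | none => (ws.foldl pvStepB (ph, none)).1)
    = ph ++ pvS ws := by
  induction ws with
  | nil => intro ph; simp [pvS]
  | cons w ws ih =>
      intro ph
      by_cases h : w ∈ pvPreps
      · have hb : pvIsP w = true := by simpa [pvIsP] using h
        simp only [List.foldl_cons, pvStepB, if_pos h, pvB_some, pvS, hb]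
        simp
      · have hb : pvIsP w = false := by simpa [pvIsP] using h
        simp only [List.foldl_cons, pvStepB, if_neg h, ih, pvS, hb]
        simp

lemma pvB_eq_S (sm : List String) : get_parsed_prepositional_phrases_alt sm = pvS sm := by
  simpa [get_parsed_prepositional_phrases_alt] using pvB_none sm []

-- ---- A = pvS ----
-- the preposition positions, as a structural recursion
def pvNIdxs : List String → List Nat
  | [] => []
  | w :: ws => if pvIsP w then 0 :: (pvNIdxs ws).map (· + 1) else (pvNIdxs ws).map (· + 1)

-- Nat-level version of the slicing loop
def pvSliN (sm : List String) : List Nat → List (List String)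
  | [] => []
  | i :: rest =>
      ((sm.drop i).take ((match rest with | [] => sm.length | j :: _ => j) - i)) :: pvSliN sm rest

lemma pvSlicesA_cast (sm : List String) : ∀ ns : List Nat,
    pvSlicesA sm (ns.map (Nat.cast : Nat → Int)) = pvSliN sm ns
  | [] => rfl
  | [i] => by
      simp [pvSlicesA, pvSliN, PySem.List.slice_natCast]
  | i :: j :: rs => by
      have ih := pvSlicesA_cast sm (j :: rs)
      simp only [List.map_cons] at ih ⊢
      show PySem.List.slice sm (some (i : Int)) (some (j : Int)) ::
        pvSlicesA sm ((j : Int) :: rs.map (Nat.cast : Nat → Int)) = _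
      rw [ih, PySem.List.slice_natCast]
      rfl

lemma pvSliN_shift (w : String) (ws sm : List String) : ∀ ns : List Nat,
    pvSliN (w :: ws) (ns.map (· + 1)) = pvSliN ws ns
  | [] => rfl
  | [i] => by
      simp only [List.map_cons, List.map_nil, pvSliN, List.drop_succ_cons, List.length_cons]
      congr 2
      omega
  | i :: j :: rs => by
      have ih := pvSliN_shift w ws sm (j :: rs)
      simp only [List.map_cons] at ih ⊢
      show ((( w :: ws).drop (i+1)).take ((j+1) - (i+1))) ::
          pvSliN (w :: ws) ((j+1) :: rs.map (· + 1)) = _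
      rw [ih]
      simp only [pvSliN, List.drop_succ_cons]
      congr 2
      omega

lemma pvTake_head (ws : List String) :
    ws.take (match pvNIdxs ws with | [] => ws.length | j :: _ => j)
      = ws.takeWhile (fun x => !pvIsP x) := by
  induction ws with
  | nil => rfl
  | cons w ws ih =>
      by_cases h : pvIsP w
      · simp [pvNIdxs, h, List.takeWhile]
      · rw [show pvNIdxs (w :: ws) = (pvNIdxs ws).map (· + 1) from by simp [pvNIdxs, h]]
        rw [show (w :: ws).takeWhile (fun x => !pvIsP x)
              = w :: ws.takeWhile (fun x => !pvIsP x) from by simp [List.takeWhile, h]]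
        cases hn : pvNIdxs ws with
        | nil =>
            rw [← ih, hn]
            simp
        | cons j rs =>
            rw [← ih, hn]
            simp

lemma pvSliN_eq_S (sm : List String) : pvSliN sm (pvNIdxs sm) = pvS sm := by
  induction sm with
  | nil => rfl
  | cons w ws ih =>
      by_cases h : pvIsP w
      · rw [show pvNIdxs (w :: ws) = 0 :: (pvNIdxs ws).map (· + 1) from by simp [pvNIdxs, h]]
        rw [show pvS (w :: ws)
              = (w :: ws.takeWhile (fun x => !pvIsP x)) :: pvS ws from by simp [pvS, h]]
        have hshift := pvSliN_shift w ws (w :: ws) (pvNIdxs ws)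
        simp only [pvSliN, hshift, ih, List.drop_zero, Nat.sub_zero]
        congr 1
        cases hn : pvNIdxs ws with
        | nil =>
            have h2 := pvTake_head ws
            rw [hn] at h2
            simp only [List.map_nil]
            show List.take (w :: ws).length (w :: ws) = w :: ws.takeWhile (fun x => !pvIsP x)
            rw [List.take_length, ← h2, List.take_length]
        | cons j rs =>
            have h2 := pvTake_head ws
            rw [hn] at h2
            simp only [List.map_cons]
            show List.take (j + 1) (w :: ws) = w :: ws.takeWhile (fun x => !pvIsP x)
            rw [List.take_succ_cons, ← h2]
      · rw [show pvNIdxs (w :: ws) = (pvNIdxs ws).map (· + 1) from by simp [pvNIdxs, h]]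
        rw [show pvS (w :: ws) = pvS ws from by simp [pvS, h]]
        rw [pvSliN_shift w ws (w :: ws) (pvNIdxs ws), ih]

lemma pvIdxs_filter (sm : List String) :
    (List.range sm.length).filter (fun n => decide (sm.getD n "" ∈ pvPreps)) = pvNIdxs sm := by
  induction sm with
  | nil => rfl
  | cons w ws ih =>
      rw [List.length_cons, List.range_succ_eq_map, List.filter_cons]
      have hmap : (List.range ws.length).filter
            ((fun n => decide ((w :: ws).getD n "" ∈ pvPreps)) ∘ Nat.succ)
          = (List.range ws.length).filter (fun n => decide (ws.getD n "" ∈ pvPreps)) := by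
        apply List.filter_congr
        intro n _
        simp [Function.comp]
      have hsucc : List.map Nat.succ (pvNIdxs ws) = (pvNIdxs ws).map (· + 1) := by
        apply List.map_congr_left
        intro n _
        omega
      by_cases h : w ∈ pvPreps
      · have hb : pvIsP w = true := by simpa [pvIsP] using h
        simp only [List.getD_cons_zero, h, decide_true]
        rw [List.filter_map, hmap, ih, hsucc]
        simp [pvNIdxs, hb]
      · have hb : pvIsP w = false := by simpa [pvIsP] using h
        simp only [List.getD_cons_zero, h, decide_false]
        rw [if_neg (by simp), List.filter_map, hmap, ih, hsucc]
        simp [pvNIdxs, hb]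

lemma pvA_eq_S (sm : List String) : get_parsed_prepositional_phrases sm = pvS sm := by
  simp only [get_parsed_prepositional_phrases]
  rw [PySem.List.foldl_append_ite_eq_filter]
  rw [PySem.List.pyRange_zero_natCast]
  rw [List.filter_map]
  have hpred : ((fun idx : Int => decide (PySem.List.pyGetD sm idx "" ∈ pvPreps)) ∘
      (fun n : Nat => (n : Int))) = fun n : Nat => decide (sm.getD n "" ∈ pvPreps) := by
    funext n
    simp [Function.comp, PySem.List.pyGetD_natCast]
  rw [hpred, pvIdxs_filter, List.nil_append]
  rw [show List.map (fun k : Nat => (k : Int)) (pvNIdxs sm)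
        = (pvNIdxs sm).map (Nat.cast : Nat → Int) from rfl]
  rw [pvSlicesA_cast, pvSliN_eq_S]

-- ===== VERDICT (by name: the statement is the Claim_ definition above) =====
theorem get_parsed_prepositional_phrases_spec : Claim_equal_get_parsed_prepositional_phrases := by
  intro sm _
  unfold Spec_get_parsed_prepositional_phrases
  rw [pvA_eq_S, pvB_eq_S]
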